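-- pv_equiv track=rewrite | github.com/StasonShelby/Algoritm | Лаба 5.py | get_sort_order
-- ===== SOURCE A (Python) =====
-- def get_sort_order(arr):
--     """Определяет порядок сортировки массива."""
--     ascending = all(arr[i] <= arr[i + 1] for i in range(len(arr) - 1))
--     descending = all(arr[i] >= arr[i + 1] for i in range(len(arr) - 1))
--
--     if ascending:
--         return "ascending"
--     elif descending:
--         return "descending"
--     else:
--         return "unsorted"
-- ===== SOURCE B (Python) =====
-- def get_sort_order(arr):
--     """Определяет порядок сортировки: сравнение с отсортированной копией."""
--     s = sorted(arr)
--     if arr == s: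
--         return "ascending"
--     if arr == s[::-1]:
--         return "descending"
--     return "unsorted"
-- ===== Notes on version B (the rewrite author's own statement) =====
-- stated objective: alternative
-- what changed: Instead of scanning adjacent pairs, B sorts a copy and decides by whole-list comparison: arr equals sorted(arr) iff non-decreasing, equals its reverse iff non-increasing.
import Mathlib
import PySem

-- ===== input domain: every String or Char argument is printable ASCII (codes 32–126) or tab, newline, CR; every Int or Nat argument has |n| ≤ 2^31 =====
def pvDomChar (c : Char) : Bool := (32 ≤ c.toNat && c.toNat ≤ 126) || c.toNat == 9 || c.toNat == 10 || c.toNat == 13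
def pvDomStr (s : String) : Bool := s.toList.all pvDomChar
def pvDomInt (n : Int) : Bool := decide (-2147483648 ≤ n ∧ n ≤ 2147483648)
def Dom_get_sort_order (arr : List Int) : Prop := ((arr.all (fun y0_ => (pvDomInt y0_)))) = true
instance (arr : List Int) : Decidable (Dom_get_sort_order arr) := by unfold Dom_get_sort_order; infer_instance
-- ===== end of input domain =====

-- B replaces A's two adjacent-pair scans by a sort-and-compare algorithm: arr equals
-- sorted(arr) iff non-decreasing, equals its reversal iff non-increasing (objective: alternative).

-- ===== PORT A =====
-- ascending = all(arr[i] <= arr[i+1] for i in range(len(arr)-1)); descending likewise; then the if-chain.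
def get_sort_order (arr : List Int) : String :=
  let ascending := (PySem.List.pyRange 0 ((arr.length : Int) - 1) 1).all
    (fun i => decide (PySem.List.pyGetD arr i 0 ≤ PySem.List.pyGetD arr (i + 1) 0))
  let descending := (PySem.List.pyRange 0 ((arr.length : Int) - 1) 1).all
    (fun i => decide (PySem.List.pyGetD arr i 0 ≥ PySem.List.pyGetD arr (i + 1) 0))
  if ascending then "ascending"
  else if descending then "descending"
  else "unsorted"

-- ===== PORT B =====
-- s = sorted(arr); arr == s → "ascending"; arr == s[::-1] → "descending"; else "unsorted".
-- s[::-1] is PySem.List.slice? s none none (-1); step -1 ≠ 0 so it is always `some`, hence getD [].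
def get_sort_order_alt (arr : List Int) : String :=
  let s := PySem.List.sorted arr (fun x => x) false
  if arr = s then "ascending"
  else if arr = (PySem.List.slice? s none none (-1)).getD [] then "descending"
  else "unsorted"

-- ===== PRECONDITION & SPEC =====
def Spec_get_sort_order (arr : List Int) (out : String) : Prop := out = get_sort_order_alt arr
instance (arr : List Int) (out : String) : Decidable (Spec_get_sort_order arr out) := by unfold Spec_get_sort_order; infer_instance

-- ===== CLAIM (what is proved, stated in full; the proofs are below) =====
def Claim_equal_get_sort_order : Prop := ∀ (arr : List Int), Dom_get_sort_order arr → Spec_get_sort_order arr (get_sort_order arr)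

-- ===== LEMMAS AND PROOFS =====

-- chain predicates over adjacent pairs (spell out A's generators)
def ascB : List Int → Bool
  | [] => true
  | [_] => true
  | x :: y :: rest => decide (x ≤ y) && ascB (y :: rest)

def descB : List Int → Bool
  | [] => true
  | [_] => true
  | x :: y :: rest => decide (x ≥ y) && descB (y :: rest)

theorem ascB_iff : ∀ (l : List Int), ascB l = true ↔ l.Pairwise (· ≤ ·)
  | [] => by simp [ascB]
  | [x] => by simp [ascB]
  | x :: y :: rest => by
    simp only [show ascB (x :: y :: rest) = (decide (x ≤ y) && ascB (y :: rest)) from rfl,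
      Bool.and_eq_true, decide_eq_true_eq, ascB_iff (y :: rest), List.pairwise_cons,
      List.mem_cons]
    constructor
    · rintro ⟨hxy, hy, hp⟩
      refine ⟨fun a ha => ?_, hy, hp⟩
      rcases ha with rfl | ha
      · exact hxy
      · exact hxy.trans (hy a ha)
    · rintro ⟨hx, hy, hp⟩
      exact ⟨hx y (Or.inl rfl), hy, hp⟩

theorem descB_iff : ∀ (l : List Int), descB l = true ↔ l.Pairwise (· ≥ ·)
  | [] => by simp [descB]
  | [x] => by simp [descB]
  | x :: y :: rest => by
    simp only [show descB (x :: y :: rest) = (decide (x ≥ y) && descB (y :: rest)) from rfl,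
      Bool.and_eq_true, decide_eq_true_eq, descB_iff (y :: rest), List.pairwise_cons,
      List.mem_cons]
    constructor
    · rintro ⟨hxy, hy, hp⟩
      refine ⟨fun a ha => ?_, hy, hp⟩
      rcases ha with rfl | ha
      · exact hxy
      · exact le_trans (hy a ha) hxy
    · rintro ⟨hx, hy, hp⟩
      exact ⟨hx y (Or.inl rfl), hy, hp⟩

theorem natAll_eq (f : Int → Int → Bool)
    (chain : List Int → Bool)
    (hnil : chain [] = true) (hone : ∀ x, chain [x] = true)
    (hcons : ∀ x y r, chain (x :: y :: r) = (f x y && chain (y :: r))) :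
    ∀ (arr : List Int),
    (List.range (arr.length - 1)).all
      (fun k => f (arr.getD k 0) (arr.getD (k + 1) 0)) = chain arr
  | [] => by simp [hnil]
  | [x] => by simp [hone]
  | x :: y :: rest => by
    have hlen : (x :: y :: rest).length - 1 = rest.length + 1 := by simp
    rw [hlen, hcons, List.range_succ_eq_map, List.all_cons, List.all_map]
    congr 1
    rw [← natAll_eq f chain hnil hone hcons (y :: rest)]
    have hlen2 : (y :: rest).length - 1 = rest.length := by simp
    rw [hlen2]
    apply List.all_congr rfl
    intro k
    simp [List.getD]

theorem allA_eq (f : Int → Int → Bool)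
    (chain : List Int → Bool)
    (hnil : chain [] = true) (hone : ∀ x, chain [x] = true)
    (hcons : ∀ x y r, chain (x :: y :: r) = (f x y && chain (y :: r)))
    (arr : List Int) :
    (PySem.List.pyRange 0 ((arr.length : Int) - 1) 1).all
      (fun i => f (PySem.List.pyGetD arr i 0) (PySem.List.pyGetD arr (i + 1) 0))
      = chain arr := by
  rw [PySem.List.pyRange_one]
  have ht : (((arr.length : Int) - 1 - 0)).toNat = arr.length - 1 := by omega
  rw [ht, List.all_map, ← natAll_eq f chain hnil hone hcons arr]
  apply List.all_congr rfl
  intro k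
  simp only [Function.comp, zero_add]
  have h2 : ((k : Int) + 1) = (((k + 1 : Nat)) : Int) := by push_cast; ring
  rw [h2, PySem.List.pyGetD_natCast, PySem.List.pyGetD_natCast]

-- arr equals its ascending sort iff it is pairwise ≤
theorem eq_sorted_iff (arr : List Int) :
    (arr = PySem.List.sorted arr (fun x => x) false) ↔ arr.Pairwise (· ≤ ·) := by
  constructor
  · intro h
    have hp := PySem.List.sorted_pairwise (xs := arr) (key := fun x => x)
    rw [← h] at hp
    exact hp
  · intro h
    exact (PySem.List.sorted_eq_self_of_pairwise arr (fun x => x) h).symm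

-- arr equals the reversal of its ascending sort iff it is pairwise ≥
theorem eq_sorted_rev_iff (arr : List Int) :
    (arr = (PySem.List.sorted arr (fun x => x) false).reverse) ↔ arr.Pairwise (· ≥ ·) := by
  constructor
  · intro h
    have hp := PySem.List.sorted_pairwise (xs := arr) (key := fun x => x)
    rw [h]
    simpa [List.pairwise_reverse] using hp
  · intro h
    have hperm : arr.reverse.Perm arr := List.reverse_perm arr
    have hpw : arr.reverse.Pairwise (· ≤ ·) := by
      simpa [List.pairwise_reverse] using h
    have heq := PySem.List.sorted_id_eq_of_perm_of_pairwise arr arr.reverse hperm hpw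
    rw [heq, List.reverse_reverse]

-- ===== VERDICT (by name: the statement is the Claim_ definition above) =====
theorem get_sort_order_spec : Claim_equal_get_sort_order := by
  intro arr _
  unfold Spec_get_sort_order get_sort_order get_sort_order_alt
  rw [allA_eq (fun x y => decide (x ≤ y)) ascB rfl (fun _ => rfl) (fun _ _ _ => rfl) arr]
  rw [allA_eq (fun x y => decide (x ≥ y)) descB rfl (fun _ => rfl) (fun _ _ _ => rfl) arr]
  simp only [PySem.List.slice?_none_none_neg_one, Option.getD_some]
  split_ifs with h1 h2 h3 h4 h5 h6 h7
  all_goals (try rfl)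
  · exact absurd ((eq_sorted_iff arr).mpr ((ascB_iff arr).mp h1)) h2
  · exact absurd ((eq_sorted_iff arr).mpr ((ascB_iff arr).mp h1)) h2
  · exact absurd ((ascB_iff arr).mpr ((eq_sorted_iff arr).mp h5)) h1
  · exact absurd ((eq_sorted_rev_iff arr).mpr ((descB_iff arr).mp h4)) h6
  · exact absurd ((ascB_iff arr).mpr ((eq_sorted_iff arr).mp h7)) h1
  · rename_i h8
    exact absurd ((descB_iff arr).mpr ((eq_sorted_rev_iff arr).mp h8)) h4
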